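-- pv_equiv track=rewrite | github.com/EdsonEddy/perfilTesis2 | workspace_thesis/dataset/py-tests/1756/146051.py | secuencia
-- ===== SOURCE A (Python) =====
-- def secuencia(j):
--     o=j%6
--     f=2**o
--     r=f*2
--     s=0
--     while r>=10:
--             e=r%10
--             r=r//10
--             s=e+r
--             r=s
--     return r
-- ===== SOURCE B (Python) =====
-- def secuencia(j):
--     n = 2 ** ((j % 6) + 1)
--     return 1 + (n - 1) % 9
-- ===== Notes on version B (the rewrite author's own statement) =====
-- stated objective: simpler
-- what changed: Replaces the iterative digit-summing while-loop with the closed-form digital root 1 + (n - 1) % 9 of n = 2**((j % 6) + 1).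
import Mathlib
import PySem

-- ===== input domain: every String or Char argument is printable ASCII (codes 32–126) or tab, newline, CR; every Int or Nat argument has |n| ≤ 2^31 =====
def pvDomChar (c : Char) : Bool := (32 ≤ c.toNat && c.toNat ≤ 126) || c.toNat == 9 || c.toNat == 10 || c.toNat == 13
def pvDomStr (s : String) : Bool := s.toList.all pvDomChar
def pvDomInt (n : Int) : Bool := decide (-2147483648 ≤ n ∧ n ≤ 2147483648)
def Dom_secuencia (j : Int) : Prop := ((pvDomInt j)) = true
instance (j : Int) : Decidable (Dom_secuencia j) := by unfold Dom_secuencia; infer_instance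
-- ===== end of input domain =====

-- B replaces A's digit-summing while-loop with the closed-form digital root 1 + (n-1) % 9 (simpler).

-- ===== PORT A =====
-- while r >= 10: e = r%10; r = r//10; s = e+r; r = s
def secuenciaLoop (r : Int) (s : Int) : Int :=
  if r ≥ 10 then
    let e := PySem.Int.mod r 10
    let r1 := PySem.Int.floordiv r 10
    let s1 := e + r1
    secuenciaLoop s1 s1
  else r
termination_by r.toNat
decreasing_by
  have h10 : (0:Int) < 10 := by norm_num
  simp only [PySem.Int.mod_eq_emod_of_pos h10, PySem.Int.floordiv_eq_ediv_of_pos h10]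
  omega

-- 2**o ported as 2 ^ o.toNat: exact here since o = j % 6 is nonnegative (Python % with positive divisor)
def secuencia (j : Int) : Int :=
  let o := PySem.Int.mod j 6
  let f : Int := 2 ^ o.toNat
  let r := f * 2
  let s : Int := 0
  secuenciaLoop r s

-- ===== PORT B =====
-- 2**((j%6)+1) ported as 2 ^ (…).toNat: exact since the exponent is nonnegative
def secuencia_alt (j : Int) : Int :=
  let n : Int := 2 ^ (PySem.Int.mod j 6 + 1).toNat
  1 + PySem.Int.mod (n - 1) 9

-- ===== PRECONDITION & SPEC =====
def Spec_secuencia (j : Int) (out : Int) : Prop := out = secuencia_alt j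
instance (j : Int) (out : Int) : Decidable (Spec_secuencia j out) := by unfold Spec_secuencia; infer_instance

-- ===== CLAIM (what is proved, stated in full; the proofs are below) =====
def Claim_equal_secuencia : Prop := ∀ (j : Int), Dom_secuencia j → Spec_secuencia j (secuencia j)

-- ===== LEMMAS AND PROOFS =====
theorem secuencia_eq_of_mod (j : Int) (m : Int) (h : PySem.Int.mod j 6 = m) :
    secuencia j = secuenciaLoop (2 ^ m.toNat * 2) 0 := by
  simp only [secuencia]
  rw [h]

theorem secuencia_alt_eq_of_mod (j : Int) (m : Int) (h : PySem.Int.mod j 6 = m) :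
    secuencia_alt j = 1 + PySem.Int.mod ((2:Int) ^ (m + 1).toNat - 1) 9 := by
  simp only [secuencia_alt]
  rw [h]

theorem loop_stop (r s : Int) (h : r < 10) : secuenciaLoop r s = r := by
  rw [secuenciaLoop, if_neg (by omega)]

theorem loop_step (r s : Int) (h : r ≥ 10) :
    secuenciaLoop r s =
      secuenciaLoop (PySem.Int.mod r 10 + PySem.Int.floordiv r 10)
        (PySem.Int.mod r 10 + PySem.Int.floordiv r 10) := by
  rw [secuenciaLoop, if_pos h]

-- ===== VERDICT (by name: the statement is the Claim_ definition above) =====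
theorem secuencia_spec : Claim_equal_secuencia := by
  intro j _
  unfold Spec_secuencia
  have h6 : (0:Int) < 6 := by norm_num
  have hlo := PySem.Int.mod_nonneg j h6
  have hhi := PySem.Int.mod_lt j h6
  set m := PySem.Int.mod j 6 with hm
  have hm' : PySem.Int.mod j 6 = m := hm.symm
  rw [secuencia_eq_of_mod j m hm', secuencia_alt_eq_of_mod j m hm']
  interval_cases m <;>
    norm_num [loop_step, loop_stop, show Int.toNat 2 = 2 from rfl, show Int.toNat 3 = 3 from rfl, show Int.toNat 4 = 4 from rfl, show Int.toNat 5 = 5 from rfl, show Int.toNat 6 = 6 from rfl, PySem.Int.mod_eq_emod_of_pos, PySem.Int.floordiv_eq_ediv_of_pos]
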